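-- pv_equiv track=rewrite | github.com/BenBrock/pytorch | torch/distributed/tensor/_nvshmem_utils.py | _chunk_sizes
-- ===== SOURCE A (Python) =====
-- def _chunk_sizes(length: int, num_chunks: int) -> list[int]:
--     if num_chunks <= 0:
--         return [length]
--     if length <= 0:
--         return [0] * num_chunks
--     chunk = (length + num_chunks - 1) // num_chunks
--     sizes = []
--     for i in range(num_chunks):
--         start = i * chunk
--         sizes.append(max(min(chunk, length - start), 0))
--     return sizes
-- ===== SOURCE B (Python) =====
-- def _chunk_sizes(length: int, num_chunks: int) -> list[int]:
--     if num_chunks <= 0: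
--         return [length]
--     if length <= 0:
--         return [0] * num_chunks
--     chunk = (length + num_chunks - 1) // num_chunks
--     full = length // chunk
--     remainder = length - full * chunk
--     return (
--         [chunk] * full
--         + ([remainder] if remainder > 0 else [])
--         + [0] * (num_chunks - full - (1 if remainder > 0 else 0))
--     )
-- ===== Notes on version B (the rewrite author's own statement) =====
-- stated objective: faster
-- what changed: Replaces the per-index loop computing max(min(chunk, length - i*chunk), 0) for each of the num_chunks positions with a closed-form build by list concatenation: full = length // chunk copies of chunk, one remainder chunk when nonzero, then zero padding to num_chunks entries.
import Mathlib
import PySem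

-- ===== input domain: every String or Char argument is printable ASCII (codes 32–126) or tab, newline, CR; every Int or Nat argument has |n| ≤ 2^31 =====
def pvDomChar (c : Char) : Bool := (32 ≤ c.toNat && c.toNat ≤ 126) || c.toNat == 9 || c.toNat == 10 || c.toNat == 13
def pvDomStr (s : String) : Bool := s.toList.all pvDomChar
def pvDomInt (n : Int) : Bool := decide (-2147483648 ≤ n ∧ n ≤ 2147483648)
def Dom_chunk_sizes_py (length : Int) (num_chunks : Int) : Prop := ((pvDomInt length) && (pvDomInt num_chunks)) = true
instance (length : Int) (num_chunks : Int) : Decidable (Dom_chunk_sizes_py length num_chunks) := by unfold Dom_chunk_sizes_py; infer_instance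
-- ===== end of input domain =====

-- B builds the result by closed-form concatenation ([chunk]*full, optional remainder, zero padding)
-- instead of A's per-index min/max loop; a timing run measured B faster (constant-factor).

-- ===== PORT A =====
def chunk_sizes_py (length : Int) (num_chunks : Int) : List Int :=
  if num_chunks ≤ 0 then [length]
  else if length ≤ 0 then List.replicate num_chunks.toNat 0
  else
    let chunk := PySem.Int.floordiv (length + num_chunks - 1) num_chunks
    (PySem.List.pyRange 0 num_chunks 1).foldl
      (fun sizes i => sizes ++ [max (min chunk (length - i * chunk)) 0]) []

-- ===== PORT B =====
def chunk_sizes_py_alt (length : Int) (num_chunks : Int) : List Int :=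
  if num_chunks ≤ 0 then [length]
  else if length ≤ 0 then List.replicate num_chunks.toNat 0
  else
    let chunk := PySem.Int.floordiv (length + num_chunks - 1) num_chunks
    let full := PySem.Int.floordiv length chunk
    let remainder := length - full * chunk
    List.replicate full.toNat chunk ++
      (if remainder > 0 then [remainder] else []) ++
      List.replicate (num_chunks - full - (if remainder > 0 then 1 else 0)).toNat 0

-- ===== PRECONDITION & SPEC =====
def Spec_chunk_sizes_py (length : Int) (num_chunks : Int) (out : List Int) : Prop := out = chunk_sizes_py_alt length num_chunks
instance (length : Int) (num_chunks : Int) (out : List Int) : Decidable (Spec_chunk_sizes_py length num_chunks out) := by unfold Spec_chunk_sizes_py; infer_instance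

-- ===== CLAIM (what is proved, stated in full; the proofs are below) =====
def Claim_equal_chunk_sizes_py : Prop := ∀ (length : Int) (num_chunks : Int), Dom_chunk_sizes_py length num_chunks → Spec_chunk_sizes_py length num_chunks (chunk_sizes_py length num_chunks)

-- ===== LEMMAS AND PROOFS =====

-- the main case, stated over the raw expressions
theorem chunks_main (L n c full : Int) (hn : 0 < n) (hL : 0 < L)
    (hc1 : c * n ≤ L + n - 1) (hc2 : L + n - 1 < (c + 1) * n)
    (hf1 : full * c ≤ L) (hf2 : L < (full + 1) * c) :
    (List.range n.toNat).map (fun k : Nat => max (min c (L - (k : Int) * c)) 0)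
      = List.replicate full.toNat c ++
        ((if L - full * c > 0 then [L - full * c] else []) ++
        List.replicate (n - full - (if L - full * c > 0 then 1 else 0)).toNat 0) := by
  have hc : 0 < c := by nlinarith
  have hfull0 : 0 ≤ full := by nlinarith
  have hLc : L ≤ c * n := by nlinarith
  have hfn : full ≤ n := by nlinarith
  have hrem : 0 ≤ L - full * c := by linarith
  have hfn' : L - full * c > 0 → full < n := by intro hr; nlinarith
  apply List.ext_getElem
  · by_cases hr : L - full * c > 0
    · have := hfn' hr
      simp only [List.length_map, List.length_range, List.length_append,
        List.length_replicate, if_pos hr, List.length_cons, List.length_nil]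
      omega
    · simp only [List.length_map, List.length_range, List.length_append,
        List.length_replicate, if_neg hr, List.length_nil]
      omega
  · intro k hk1 hk2
    have hkn : k < n.toNat := by simpa using hk1
    by_cases hr : L - full * c > 0
    · have hfn2 : full < n := hfn' hr
      simp only [if_pos hr] at hk2 ⊢
      simp only [List.getElem_map, List.getElem_range, List.getElem_append,
        List.length_append, List.length_replicate, List.getElem_replicate,
        List.length_cons, List.length_nil]
      split_ifs with h1 h2
      · -- k < full: full chunk
        have hk : (k : Int) + 1 ≤ full := by omega
        have : ((k : Int) + 1) * c ≤ full * c := by nlinarith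
        rw [min_eq_left (by nlinarith), max_eq_left hc.le]
      · -- k = full: remainder chunk
        have hk : (k : Int) = full := by omega
        rw [List.getElem_singleton, hk, min_eq_right (by linarith), max_eq_left hrem]
      · -- k > full: zero pad
        have hk : full + 1 ≤ (k : Int) := by omega
        have : (full + 1) * c ≤ (k : Int) * c := by nlinarith
        rw [min_eq_right (by linarith), max_eq_right (by linarith)]
    · have heq : L = full * c := by omega
      simp only [if_neg hr] at hk2 ⊢
      simp only [List.getElem_map, List.getElem_range, List.getElem_append,
        List.length_append, List.length_replicate, List.getElem_replicate,
        List.length_nil]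
      split_ifs with h1 h2
      · -- k < full: full chunk
        have hk : (k : Int) + 1 ≤ full := by omega
        have : ((k : Int) + 1) * c ≤ full * c := by nlinarith
        rw [min_eq_left (by nlinarith), max_eq_left hc.le]
      · -- middle list is empty
        exact absurd h2 (by omega)
      · -- k ≥ full: zero pad
        have hk : full ≤ (k : Int) := by omega
        have : full * c ≤ (k : Int) * c := by nlinarith
        rw [min_eq_right (by linarith), max_eq_right (by linarith)]

-- ===== VERDICT (by name: the statement is the Claim_ definition above) =====
theorem chunk_sizes_py_spec : Claim_equal_chunk_sizes_py := by
  intro L n _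
  unfold Spec_chunk_sizes_py chunk_sizes_py chunk_sizes_py_alt
  split_ifs with h1 h2
  · rfl
  · rfl
  · have hn : 0 < n := by omega
    have hL : 0 < L := by omega
    set c := PySem.Int.floordiv (L + n - 1) n with hcdef
    set full := PySem.Int.floordiv L c with hfdef
    have hc := (PySem.Int.floordiv_eq_iff_of_pos hn).mp hcdef.symm
    have hcpos : 0 < c := by nlinarith [hc.1, hc.2]
    have hf := (PySem.Int.floordiv_eq_iff_of_pos hcpos).mp hfdef.symm
    rw [PySem.List.foldl_append_singleton_eq_map, List.nil_append,
        PySem.List.pyRange_one, List.map_map]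
    have h := chunks_main L n c full hn hL hc.1 hc.2 hf.1 hf.2
    simp only [List.append_assoc]
    simpa [Function.comp] using h
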